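-- pv_equiv track=rewrite | github.com/avishek-sen-gupta/codescry | src/repo_surveyor/graph_builder.py | _build_directory_hierarchy
-- ===== SOURCE A (Python) =====
-- class _DirNode:
--     PATH = "path"
--     NAME = "name"
--     MARKER_FILE = "marker_file"
--
-- class _DirRel:
--     PARENT = "parent"
--     CHILD = "child"
--
-- def _build_directory_hierarchy(
--     directories: dict[str, dict],
--     relationships: list[dict],
--     path: str,
-- ) -> list[dict]:
--     """Walk up the path to create intermediate directories and relationships."""
--     current = path
--     new_relationships = list(relationships)
--     new_directories = dict(directories)
--
--     while "/" in current:
--         parent = current.rsplit("/", 1)[0]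
--         if not parent:
--             break
--
--         if parent not in new_directories:
--             new_directories[parent] = {
--                 _DirNode.PATH: parent,
--                 _DirNode.NAME: parent.split("/")[-1],
--                 _DirNode.MARKER_FILE: "",
--             }
--
--         rel = {_DirRel.PARENT: parent, _DirRel.CHILD: current}
--         if rel not in new_relationships:
--             new_relationships.append(rel)
--
--         current = parent
--
--     directories.update(new_directories)
--     return new_relationships
-- ===== SOURCE B (Python) =====
-- def _build_directory_hierarchy(directories, relationships, path):
--     """Different decomposition: one left-to-right character scan collects every
--     ancestor prefix of `path` (the text before each '/', plus `path` itself);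
--     then the consecutive (parent, child) prefix pairs are processed deepest-first,
--     deduplicating as we go.  Mutates `directories` exactly like the original."""
--     prefixes = []
--     acc = ""
--     for ch in path:
--         if ch == "/":
--             prefixes.append(acc)
--         acc = acc + ch
--     prefixes.append(path)
--
--     new_relationships = list(relationships)
--     new_directories = dict(directories)
--     for parent, child in zip(reversed(prefixes[:-1]), reversed(prefixes[1:])):
--         if not parent:
--             continue
--         if parent not in new_directories:
--             new_directories[parent] = {
--                 "path": parent,
--                 "name": parent.split("/")[-1],
--                 "marker_file": "",
--             }
--         rel = {"parent": parent, "child": child}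
--         if rel not in new_relationships:
--             new_relationships.append(rel)
--     directories.update(new_directories)
--     return new_relationships
-- ===== Notes on version B (the rewrite author's own statement) =====
-- stated objective: alternative
-- what changed: A repeatedly rsplits the current path to walk upward one level at a time; B instead makes a single left-to-right character scan collecting every ancestor prefix, then one pass over the consecutive (parent, child) prefix pairs, with the same dedup-append and the same in-place update of `directories`.
import Mathlib
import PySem

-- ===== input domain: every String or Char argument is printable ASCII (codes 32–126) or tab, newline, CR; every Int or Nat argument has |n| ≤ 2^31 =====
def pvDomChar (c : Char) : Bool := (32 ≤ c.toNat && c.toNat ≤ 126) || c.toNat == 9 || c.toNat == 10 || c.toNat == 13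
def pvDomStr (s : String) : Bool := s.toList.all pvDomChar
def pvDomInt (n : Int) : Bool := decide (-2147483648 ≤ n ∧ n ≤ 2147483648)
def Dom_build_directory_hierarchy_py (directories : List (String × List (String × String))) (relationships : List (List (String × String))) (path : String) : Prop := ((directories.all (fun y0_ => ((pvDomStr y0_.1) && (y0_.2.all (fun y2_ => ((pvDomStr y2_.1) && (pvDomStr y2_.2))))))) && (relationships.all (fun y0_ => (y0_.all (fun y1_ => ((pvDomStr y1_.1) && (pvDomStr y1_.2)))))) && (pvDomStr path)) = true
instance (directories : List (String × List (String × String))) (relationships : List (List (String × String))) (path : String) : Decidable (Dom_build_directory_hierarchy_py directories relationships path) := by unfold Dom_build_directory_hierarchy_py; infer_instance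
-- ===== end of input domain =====

-- B replaces A's repeated rsplit walk by a single character scan that collects all
-- ancestor prefixes, then one pass over consecutive prefix pairs (objective: alternative).
-- Both Pythons mutate `directories` in place identically; the equivalence proved here is
-- about the RETURN VALUE only, so the ports omit the directory bookkeeping (it never
-- affects the returned relationship list).

-- Python `==` on dicts represented as association lists (first match wins, per the
-- task's dict convention): equal key sets with equal looked-up values, order ignored.
def pvDictGet (d : List (String × String)) (k : String) : Option String :=
  (d.find? (fun p => p.1 == k)).map (·.2)

def pvDictEq (a b : List (String × String)) : Bool :=
  a.all (fun p => pvDictGet a p.1 == pvDictGet b p.1) &&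
  b.all (fun p => pvDictGet b p.1 == pvDictGet a p.1)

-- ===== PORT A =====
-- current.rsplit("/", 1)[0] when "/" is in current: everything before the LAST '/'
-- (hand-ported: PySem has no rsplit-with-maxsplit; exact for that case).
def pvParentOf (cs : List Char) : List Char :=
  ((cs.reverse.dropWhile (fun c => c != '/')).drop 1).reverse

-- a string containing '/' splits uniquely at its last '/' (used for termination below)
theorem pv_lastSlash_decomp (cs : List Char) (h : '/' ∈ cs) :
    ∃ a b, cs = a ++ '/' :: b ∧ '/' ∉ b := by
  induction cs with
  | nil => cases h
  | cons c rest ih =>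
    by_cases hr : '/' ∈ rest
    · obtain ⟨a, b, rfl, hb⟩ := ih hr
      exact ⟨c :: a, b, rfl, hb⟩
    · rcases List.mem_cons.mp h with hc | hc
      · exact ⟨[], rest, by simp [hc.symm], hr⟩
      · exact absurd hc hr

theorem pvParentOf_append (a b : List Char) (hb : '/' ∉ b) :
    pvParentOf (a ++ '/' :: b) = a := by
  have hall : ∀ c ∈ b.reverse, (c != '/') = true := by
    intro c hc
    simp only [List.mem_reverse] at hc
    simp only [bne_iff_ne, ne_eq]
    exact fun hEq => hb (hEq ▸ hc)
  simp [pvParentOf, List.dropWhile_append, List.dropWhile_eq_nil_iff.mpr hall]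

theorem pvParentOf_length_lt (cs : List Char) (h : '/' ∈ cs) :
    (pvParentOf cs).length < cs.length := by
  obtain ⟨a, b, rfl, hb⟩ := pv_lastSlash_decomp cs h
  rw [pvParentOf_append a b hb]
  simp

-- A's while-loop: walk up with rsplit, break on empty parent, dedup-append each rel.
def pvALoop (rels : List (List (String × String))) (cur : List Char) :
    List (List (String × String)) :=
  if h : '/' ∈ cur then                      -- while "/" in current
    let parent := pvParentOf cur             -- parent = current.rsplit("/", 1)[0]
    if parent = [] then rels                 -- if not parent: break
    else
      let rel := [("parent", String.ofList parent), ("child", String.ofList cur)]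
      let rels' := if rels.any (fun d => pvDictEq d rel) then rels else rels ++ [rel]
      pvALoop rels' parent                   -- current = parent
  else rels
termination_by cur.length
decreasing_by exact pvParentOf_length_lt cur h

def build_directory_hierarchy_py (directories : List (String × List (String × String))) (relationships : List (List (String × String))) (path : String) : List (List (String × String)) :=
  pvALoop relationships path.toList

-- ===== PORT B =====
-- the character-scan loop body: record acc before each '/', always extend acc
def pvScanStep (st : List (List Char) × List Char) (ch : Char) :
    List (List Char) × List Char :=
  (if ch = '/' then st.1 ++ [st.2] else st.1, st.2 ++ [ch])

-- loop body of B's single pass over the (parent, child) prefix pairs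
def pvRelStep (rels : List (List (String × String))) (pc : List Char × List Char) :
    List (List (String × String)) :=
  if pc.1 = [] then rels                     -- if not parent: continue
  else
    let rel := [("parent", String.ofList pc.1), ("child", String.ofList pc.2)]
    if rels.any (fun d => pvDictEq d rel) then rels else rels ++ [rel]

-- zip(reversed(l[:-1]), reversed(l[1:])): consecutive pairs, deepest first
def pvRevPairs (l : List (List Char)) : List (List Char × List Char) :=
  (l.dropLast.reverse).zip ((l.drop 1).reverse)

def build_directory_hierarchy_py_alt (directories : List (String × List (String × String))) (relationships : List (List (String × String))) (path : String) : List (List (String × String)) :=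
  let cs := path.toList
  let prefixes := (cs.foldl pvScanStep ([], [])).1 ++ [cs]
  (pvRevPairs prefixes).foldl pvRelStep relationships

-- ===== PRECONDITION & SPEC =====
def Spec_build_directory_hierarchy_py (directories : List (String × List (String × String))) (relationships : List (List (String × String))) (path : String) (out : List (List (String × String))) : Prop := out = build_directory_hierarchy_py_alt directories relationships path
instance (directories : List (String × List (String × String))) (relationships : List (List (String × String))) (path : String) (out : List (List (String × String))) : Decidable (Spec_build_directory_hierarchy_py directories relationships path out) := by unfold Spec_build_directory_hierarchy_py; infer_instance

-- ===== CLAIM (what is proved, stated in full; the proofs are below) =====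
def Claim_equal_build_directory_hierarchy_py : Prop := ∀ (directories : List (String × List (String × String))) (relationships : List (List (String × String))) (path : String), Dom_build_directory_hierarchy_py directories relationships path → Spec_build_directory_hierarchy_py directories relationships path (build_directory_hierarchy_py directories relationships path)

-- ===== LEMMAS AND PROOFS =====

-- the second scan component is always the characters consumed so far
theorem pvScan_snd (cs : List Char) (st : List (List Char) × List Char) :
    (cs.foldl pvScanStep st).2 = st.2 ++ cs := by
  induction cs generalizing st with
  | nil => simp
  | cons c rest ih => simp [List.foldl_cons, pvScanStep, ih]

-- a slash-free suffix contributes no prefixes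
theorem pvScan_fst_noslash (cs : List Char) (st : List (List Char) × List Char)
    (h : '/' ∉ cs) : (cs.foldl pvScanStep st).1 = st.1 := by
  induction cs generalizing st with
  | nil => rfl
  | cons c rest ih =>
    have hc : c ≠ '/' := fun hc => h (hc ▸ List.mem_cons_self)
    have hr : '/' ∉ rest := fun hr => h (List.mem_cons_of_mem _ hr)
    rw [List.foldl_cons, ih _ hr]
    simp [pvScanStep, fun hEq => hc hEq]

theorem pvScan_fst_decomp (a b : List Char) (hb : '/' ∉ b) :
    ((a ++ '/' :: b).foldl pvScanStep ([], [])).1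
      = (a.foldl pvScanStep ([], [])).1 ++ [a] := by
  have h1 : (a ++ '/' :: b) = (a ++ ['/']) ++ b := by simp
  rw [h1, List.foldl_append, pvScan_fst_noslash b _ hb, List.foldl_append]
  simp [pvScanStep, pvScan_snd]

theorem pvRevPairs_singleton (x : List Char) : pvRevPairs [x] = [] := rfl

theorem pvRevPairs_append2 (l : List (List Char)) (x y : List Char) :
    pvRevPairs (l ++ [x, y]) = (x, y) :: pvRevPairs (l ++ [x]) := by
  have h2 : l ++ [x, y] = (l ++ [x]) ++ [y] := by simp
  have hdl : (l ++ [x, y]).dropLast = l ++ [x] := by rw [h2, List.dropLast_concat]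
  have hdrop : (l ++ [x, y]).drop 1 = ((l ++ [x]).drop 1) ++ [y] := by
    rw [h2, List.drop_append_of_le_length (by simp)]
  rw [pvRevPairs, hdl, hdrop]
  simp only [List.reverse_append, List.reverse_cons, List.reverse_nil, List.nil_append,
    List.singleton_append, List.zip_cons_cons]
  rw [pvRevPairs, List.dropLast_concat]

-- main invariant: A's rsplit walk = B's fold over the reversed consecutive prefix pairs
theorem pv_main (n : Nat) : ∀ cs : List Char, cs.length ≤ n →
    ∀ rels, pvALoop rels cs
      = (pvRevPairs ((cs.foldl pvScanStep ([], [])).1 ++ [cs])).foldl pvRelStep rels := by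
  induction n with
  | zero =>
    intro cs hcs rels
    have : cs = [] := List.length_eq_zero_iff.mp (Nat.le_zero.mp hcs)
    subst this
    rw [pvALoop]
    simp [pvRevPairs_singleton]
  | succ n ih =>
    intro cs hcs rels
    by_cases h : '/' ∈ cs
    · obtain ⟨a, b, rfl, hb⟩ := pv_lastSlash_decomp cs h
      have hpar := pvParentOf_append a b hb
      have hpref := pvScan_fst_decomp a b hb
      rw [pvALoop, dif_pos h]
      simp only [hpar]
      rw [hpref]
      have hpairs : pvRevPairs ((a.foldl pvScanStep ([], [])).1 ++ [a] ++ [a ++ '/' :: b])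
          = (a, a ++ '/' :: b) :: pvRevPairs ((a.foldl pvScanStep ([], [])).1 ++ [a]) := by
        have : (a.foldl pvScanStep ([], [])).1 ++ [a] ++ [a ++ '/' :: b]
            = (a.foldl pvScanStep ([], [])).1 ++ [a, a ++ '/' :: b] := by simp
        rw [this, pvRevPairs_append2]
      rw [hpairs]
      by_cases ha : a = []
      · subst ha
        simp only [List.foldl_cons, pvRelStep]
        have hP : (([] : List Char).foldl pvScanStep ([], [])).1 = ([] : List (List Char)) := rfl
        rw [hP]
        simp [pvRevPairs_singleton]
      · rw [if_neg ha]
        have hlen : a.length ≤ n := by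
          have := hcs
          simp only [List.length_append, List.length_cons] at this
          omega
        rw [List.foldl_cons]
        have hstep : pvRelStep rels (a, a ++ '/' :: b)
            = (if rels.any (fun d => pvDictEq d
                  [("parent", String.ofList a), ("child", String.ofList (a ++ '/' :: b))])
               then rels
               else rels ++ [[("parent", String.ofList a), ("child", String.ofList (a ++ '/' :: b))]]) := by
          rw [pvRelStep, if_neg ha]
        rw [hstep, ← ih a hlen]
    · rw [pvALoop, dif_neg h]
      rw [pvScan_fst_noslash cs _ h]
      simp [pvRevPairs_singleton]

-- ===== VERDICT (by name: the statement is the Claim_ definition above) =====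
theorem build_directory_hierarchy_py_spec : Claim_equal_build_directory_hierarchy_py := by
  intro directories relationships path _
  unfold Spec_build_directory_hierarchy_py build_directory_hierarchy_py
    build_directory_hierarchy_py_alt
  exact pv_main path.toList.length path.toList (le_refl _) relationships
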